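-- pv_equiv track=rewrite | github.com/batfish/lab-validation | src/lab_validation/validators/AristaValidator.py | _canonicalize_arista_interface
-- ===== SOURCE A (Python) =====
-- _ARISTA_IFACE_ABBREVIATIONS = {
--     "Eth": "Ethernet",
--     "Et": "Ethernet",
--     "Lo": "Loopback",
--     "Ma": "Management",
--     "Po": "Port-Channel",
--     "Vl": "Vlan",
-- }
--
-- def _canonicalize_arista_interface(name: str) -> str:
--     """Expand an abbreviated Arista interface name to its canonical form."""
--     for prefix in sorted(_ARISTA_IFACE_ABBREVIATIONS, key=len, reverse=True):
--         if (
--             name.startswith(prefix)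
--             and len(name) > len(prefix)
--             and not name[len(prefix)].isalpha()
--         ):
--             return _ARISTA_IFACE_ABBREVIATIONS[prefix] + name[len(prefix) :]
--     return name
-- ===== SOURCE B (Python) =====
-- _ARISTA_IFACE_ABBREVIATIONS = {
--     "Eth": "Ethernet",
--     "Et": "Ethernet",
--     "Lo": "Loopback",
--     "Ma": "Management",
--     "Po": "Port-Channel",
--     "Vl": "Vlan",
-- }
--
-- def _canonicalize_arista_interface(name: str) -> str:
--     """Expand an abbreviated Arista interface name to its canonical form."""
--     i = 0
--     while i < len(name) and name[i].isalpha():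
--         i += 1
--     if i < len(name):
--         expansion = _ARISTA_IFACE_ABBREVIATIONS.get(name[:i])
--         if expansion is not None:
--             return expansion + name[i:]
--     return name
-- ===== Notes on version B (the rewrite author's own statement) =====
-- stated objective: simpler
-- what changed: B scans the input once for its maximal leading alphabetic run and does a single dict lookup of that run, instead of A's length-sorted startswith scan over all abbreviation keys.
import Mathlib
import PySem

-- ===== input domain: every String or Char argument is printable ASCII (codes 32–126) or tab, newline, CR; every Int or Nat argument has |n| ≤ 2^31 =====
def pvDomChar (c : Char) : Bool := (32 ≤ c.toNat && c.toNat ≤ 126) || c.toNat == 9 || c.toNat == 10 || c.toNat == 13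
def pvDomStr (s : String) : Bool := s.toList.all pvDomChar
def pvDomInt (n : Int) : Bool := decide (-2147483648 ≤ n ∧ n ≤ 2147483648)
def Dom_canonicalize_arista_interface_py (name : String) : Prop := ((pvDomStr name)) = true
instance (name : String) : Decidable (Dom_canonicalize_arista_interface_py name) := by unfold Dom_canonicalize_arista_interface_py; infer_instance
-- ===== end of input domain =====

-- B replaces A's length-sorted startswith scan over the abbreviation keys by a single
-- left-to-right scan of the input for its maximal alphabetic run plus one dict lookup (objective: simpler).

-- ===== PORT A =====
-- the module constant _ARISTA_IFACE_ABBREVIATIONS (shared by both Pythons), keys/values as char lists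
def aristaDict : PySem.Dict (List Char) (List Char) :=
  PySem.Dict.ofList
    [("Eth".toList, "Ethernet".toList),
     ("Et".toList,  "Ethernet".toList),
     ("Lo".toList,  "Loopback".toList),
     ("Ma".toList,  "Management".toList),
     ("Po".toList,  "Port-Channel".toList),
     ("Vl".toList,  "Vlan".toList)]

-- the loop condition of A: name.startswith(prefix) and len(name) > len(prefix) and not name[len(prefix)].isalpha()
-- (name[len(prefix)] is a 1-char string; its .isalpha() is isalpha of that char)
def pvCondA (cs p : List Char) : Bool :=
  PySem.Chars.startswith cs p && decide (p.length < cs.length)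
    && !((PySem.List.pyGet? cs (p.length : Int)).elim false PySem.Chars.isalpha)

-- 'for prefix in prefixes: if cond: return _ARISTA_IFACE_ABBREVIATIONS[prefix] + name[len(prefix):]' / 'return name'
def pvAGo (cs : List Char) : List (List Char) → List Char
  | [] => cs
  | p :: ps =>
      if pvCondA cs p then aristaDict.getD p [] ++ PySem.List.slice cs (some (p.length : Int)) none
      else pvAGo cs ps

def canonicalize_arista_interface_py (name : String) : String :=
  -- sorted(_ARISTA_IFACE_ABBREVIATIONS, key=len, reverse=True)
  String.ofList (pvAGo name.toList (PySem.List.sorted aristaDict.keys (fun p => p.length) true))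

-- ===== PORT B =====
-- the while loop 'i = 0; while i < len(name) and name[i].isalpha(): i += 1' (counts the leading alpha run)
def pvRun : List Char → Nat
  | [] => 0
  | c :: rest => if PySem.Chars.isalpha c then pvRun rest + 1 else 0

def canonicalize_arista_interface_py_alt (name : String) : String :=
  let cs := name.toList
  let i := pvRun cs
  if i < cs.length then
    match aristaDict.get? (cs.take i) with   -- _ARISTA_IFACE_ABBREVIATIONS.get(name[:i])
    | some expansion => String.ofList (expansion ++ cs.drop i)   -- expansion + name[i:]
    | none => String.ofList cs
  else String.ofList cs

-- ===== PRECONDITION & SPEC =====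
def Spec_canonicalize_arista_interface_py (name : String) (out : String) : Prop := out = canonicalize_arista_interface_py_alt name
instance (name : String) (out : String) : Decidable (Spec_canonicalize_arista_interface_py name out) := by unfold Spec_canonicalize_arista_interface_py; infer_instance

-- ===== CLAIM (what is proved, stated in full; the proofs are below) =====
def Claim_equal_canonicalize_arista_interface_py : Prop := ∀ (name : String), Dom_canonicalize_arista_interface_py name → Spec_canonicalize_arista_interface_py name (canonicalize_arista_interface_py name)

-- ===== LEMMAS AND PROOFS =====

lemma pvRun_append_alpha (p rest : List Char) (h : p.all PySem.Chars.isalpha = true) :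
    pvRun (p ++ rest) = p.length + pvRun rest := by
  induction p with
  | nil => simp [pvRun]
  | cons c t ih =>
      simp only [List.all_cons, Bool.and_eq_true] at h
      simp only [List.cons_append, pvRun, h.1, if_pos, List.length_cons, ih h.2]; omega

lemma pvRun_stop (cs : List Char) (h : pvRun cs < cs.length) :
    PySem.Chars.isalpha (cs.getD (pvRun cs) ' ') = false := by
  induction cs with
  | nil => simp [pvRun] at h
  | cons c rest ih =>
      by_cases hc : PySem.Chars.isalpha c = true
      · simp only [pvRun, hc, if_pos] at h ⊢
        simp only [List.length_cons] at h
        simpa using ih (by omega)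
      · have hc' : PySem.Chars.isalpha c = false := by simpa using hc
        simp [pvRun, hc']

-- A's branch condition characterised through B's run counter (p an all-alpha key)
lemma pvCondA_iff (cs p : List Char) (hall : p.all PySem.Chars.isalpha = true) :
    pvCondA cs p = true ↔ pvRun cs = p.length ∧ p.length < cs.length ∧ cs.take p.length = p := by
  constructor
  · intro h
    simp only [pvCondA, Bool.and_eq_true, decide_eq_true_eq, Bool.not_eq_true'] at h
    obtain ⟨⟨hsw, hlt⟩, hget⟩ := h
    obtain ⟨rest, hrest⟩ := (PySem.Chars.startswith_iff cs p).mp hsw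
    have hrl : rest ≠ [] := by
      intro hnil
      rw [hnil, List.append_nil] at hrest
      rw [← hrest] at hlt; omega
    obtain ⟨c, rest', rfl⟩ := List.exists_cons_of_ne_nil hrl
    subst hrest
    have hgc : PySem.List.pyGet? (p ++ c :: rest') (p.length : Int) = some c := by
      rw [PySem.List.pyGet?_natCast]
      simp
    have hca : PySem.Chars.isalpha c = false := by
      rw [hgc] at hget; simpa using hget
    have hrun : pvRun (p ++ c :: rest') = p.length := by
      rw [pvRun_append_alpha p _ hall]
      simp [pvRun, hca]
    exact ⟨hrun, hlt, by simp⟩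
  · rintro ⟨hrun, hlt, htake⟩
    have hpref : p <+: cs := htake ▸ List.take_prefix _ _
    have hstop := pvRun_stop cs (hrun ▸ hlt)
    rw [hrun] at hstop
    simp only [pvCondA, Bool.and_eq_true, decide_eq_true_eq, Bool.not_eq_true']
    refine ⟨⟨(PySem.Chars.startswith_iff cs p).mpr hpref, hlt⟩, ?_⟩
    have hget : PySem.List.pyGet? cs (p.length : Int) = some (cs.getD p.length ' ') := by
      rw [PySem.List.pyGet?_natCast]
      simp [List.getD, List.getElem?_eq_getElem hlt]
    rw [hget]; simpa using hstop

-- a fired branch of A equals B's lookup result (K the key the run hit, V its expansion)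
lemma pvPosCase (cs : List Char) (i : Nat) (K V : List Char)
    (hilen : (cs.take i).length = i) (hK : cs.take i = K)
    (hget : aristaDict.get? K = some V) (hgetD : aristaDict.getD K [] = V) :
    aristaDict.getD K [] ++ PySem.List.slice cs (some (K.length : Int)) none =
      (match aristaDict.get? (cs.take i) with
       | some expansion => expansion ++ cs.drop i
       | none => cs) := by
  have hKi : K.length = i := by rw [← hK, hilen]
  rw [hK, hget, hgetD, PySem.List.slice_from_natCast, hKi]

-- the list-level equivalence on the concrete sorted key list
lemma pvAGo_eq_alt (cs : List Char) :
    pvAGo cs (PySem.List.sorted aristaDict.keys (fun p => p.length) true) =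
      (if pvRun cs < cs.length then
        match aristaDict.get? (cs.take (pvRun cs)) with
        | some expansion => expansion ++ cs.drop (pvRun cs)
        | none => cs
      else cs) := by
  have hsorted : PySem.List.sorted aristaDict.keys (fun p => p.length) true =
      [['E','t','h'], ['E','t'], ['L','o'], ['M','a'], ['P','o'], ['V','l']] := by decide
  rw [hsorted]
  set i := pvRun cs with hi
  by_cases hlt : i < cs.length
  · -- the run stops inside cs; A fires exactly on the key equal to the run, B looks the run up
    have hilen : (cs.take i).length = i := by
      simp [List.length_take, Nat.min_eq_left (Nat.le_of_lt hlt)]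
    have hfire : ∀ p : List Char, p.all PySem.Chars.isalpha = true →
        (pvCondA cs p = true ↔ cs.take i = p) := by
      intro p hall
      constructor
      · intro h
        obtain ⟨hrun, _, htake⟩ := (pvCondA_iff cs p hall).mp h
        rw [hi, hrun]; exact htake
      · intro h
        have hplen : p.length = i := by rw [← h, hilen]
        exact (pvCondA_iff cs p hall).mpr ⟨by omega, by omega, by rw [hplen, h]⟩
    have hcond : ∀ p : List Char, p.all PySem.Chars.isalpha = true →
        pvCondA cs p = decide (cs.take i = p) := by
      intro p hall
      by_cases h : cs.take i = p
      · simp [h, (hfire p hall).mpr h]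
      · simp only [h, decide_false]
        exact Bool.eq_false_iff.mpr (fun hb => h ((hfire p hall).mp hb))
    simp only [pvAGo,
      hcond ['E','t','h'] (by decide), hcond ['E','t'] (by decide),
      hcond ['L','o'] (by decide), hcond ['M','a'] (by decide),
      hcond ['P','o'] (by decide), hcond ['V','l'] (by decide), if_pos hlt]
    by_cases h1 : cs.take i = ['E','t','h']
    · simpa [h1] using pvPosCase cs i ['E','t','h'] "Ethernet".toList hilen h1 (by decide) (by decide)
    by_cases h2 : cs.take i = ['E','t']
    · simpa [h1,h2] using pvPosCase cs i ['E','t'] "Ethernet".toList hilen h2 (by decide) (by decide)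
    by_cases h3 : cs.take i = ['L','o']
    · simpa [h1,h2,h3] using pvPosCase cs i ['L','o'] "Loopback".toList hilen h3 (by decide) (by decide)
    by_cases h4 : cs.take i = ['M','a']
    · simpa [h1,h2,h3,h4] using pvPosCase cs i ['M','a'] "Management".toList hilen h4 (by decide) (by decide)
    by_cases h5 : cs.take i = ['P','o']
    · simpa [h1,h2,h3,h4,h5] using pvPosCase cs i ['P','o'] "Port-Channel".toList hilen h5 (by decide) (by decide)
    by_cases h6 : cs.take i = ['V','l']
    · simpa [h1,h2,h3,h4,h5,h6] using pvPosCase cs i ['V','l'] "Vlan".toList hilen h6 (by decide) (by decide)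
    -- the run is not an abbreviation key: both sides return cs
    have hnone : aristaDict.get? (cs.take i) = none := by
      have e1 : (['E','t','h'] == cs.take i) = false := by
        simpa using fun h => h1 h.symm
      have e2 : (['E','t'] == cs.take i) = false := by simpa using fun h => h2 h.symm
      have e3 : (['L','o'] == cs.take i) = false := by simpa using fun h => h3 h.symm
      have e4 : (['M','a'] == cs.take i) = false := by simpa using fun h => h4 h.symm
      have e5 : (['P','o'] == cs.take i) = false := by simpa using fun h => h5 h.symm
      have e6 : (['V','l'] == cs.take i) = false := by simpa using fun h => h6 h.symm
      have hmk : aristaDict = PySem.Dict.mk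
          [(['E','t','h'], "Ethernet".toList), (['E','t'], "Ethernet".toList),
           (['L','o'], "Loopback".toList), (['M','a'], "Management".toList),
           (['P','o'], "Port-Channel".toList), (['V','l'], "Vlan".toList)] := by decide
      rw [hmk]
      simp [PySem.Dict.get?, e1, e2, e3, e4, e5, e6]
    simp [h1, h2, h3, h4, h5, h6, hnone]
  · -- the whole string is alphabetic (or empty): no key passes A's length test, B's i = len
    have hnone : ∀ p : List Char, p.all PySem.Chars.isalpha = true → pvCondA cs p = false := by
      intro p hall
      rw [Bool.eq_false_iff]; intro hbad
      obtain ⟨hrun, hplen, _⟩ := (pvCondA_iff cs p hall).mp hbad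
      rw [hi] at hlt; omega
    simp [pvAGo, hnone ['E','t','h'] (by decide), hnone ['E','t'] (by decide),
      hnone ['L','o'] (by decide), hnone ['M','a'] (by decide),
      hnone ['P','o'] (by decide), hnone ['V','l'] (by decide), hlt]

-- ===== VERDICT (by name: the statement is the Claim_ definition above) =====
theorem canonicalize_arista_interface_py_spec : Claim_equal_canonicalize_arista_interface_py := by
  intro name _
  unfold Spec_canonicalize_arista_interface_py canonicalize_arista_interface_py canonicalize_arista_interface_py_alt
  rw [pvAGo_eq_alt]
  by_cases h : pvRun name.toList < name.toList.length
  · have h' : pvRun name.toList < name.length := by simpa using h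
    cases hg : aristaDict.get? (List.take (pvRun name.toList) name.toList) <;>
      simp [h', hg, String.ofList_append]
  · have h' : ¬ pvRun name.toList < name.length := by simpa using h
    simp [h']
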